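-- pv_equiv track=rewrite | github.com/alexchandler100/kr-calc | python_scripts/functions.py | planar_support_alt
-- ===== SOURCE A (Python) =====
-- def planar_support_alt(homology):
--     planes = 0
--     points = list(homology.keys())
--     while len(points)>0:
--         base_point=points[0]
--         delta = sum(list(base_point))
--         points=[point for point in points if sum(list(point))!=delta]
--         planes+=1
--     return planes
-- ===== SOURCE B (Python) =====
-- def planar_support_alt(homology):
--     return len({sum(point) for point in homology.keys()})
-- ===== Notes on version B (the rewrite author's own statement) =====
-- stated objective: faster
-- what changed: Replaces A's repeated scan-and-filter loop over the key list with a single set comprehension of coordinate-sums whose size is returned.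
import Mathlib
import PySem

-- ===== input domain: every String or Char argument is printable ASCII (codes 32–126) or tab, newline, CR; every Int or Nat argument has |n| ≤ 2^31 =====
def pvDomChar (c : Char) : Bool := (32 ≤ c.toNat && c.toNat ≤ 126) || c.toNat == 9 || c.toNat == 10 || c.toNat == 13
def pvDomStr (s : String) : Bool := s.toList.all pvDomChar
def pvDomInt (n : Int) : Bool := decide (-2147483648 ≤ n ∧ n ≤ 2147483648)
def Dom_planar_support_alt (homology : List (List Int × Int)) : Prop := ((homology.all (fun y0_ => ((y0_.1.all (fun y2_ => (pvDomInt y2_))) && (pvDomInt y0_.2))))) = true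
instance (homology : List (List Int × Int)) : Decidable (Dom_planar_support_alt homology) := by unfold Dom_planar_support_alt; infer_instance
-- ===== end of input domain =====

-- B replaces A's repeated scan-and-filter over the key list by one set comprehension of
-- coordinate-sums; objective: faster (one pass instead of quadratic refiltering).

-- ===== PORT A =====
-- the while loop: pick points[0]'s sum, drop all points with that sum, count a plane
def pvALoop (points : List (List Int)) : Int :=
  if h : points = [] then 0
  else
    let delta := (points.head h).sum
    pvALoop (points.filter (fun point => point.sum ≠ delta)) + 1
termination_by points.length
decreasing_by
  rw [List.length_unattach, ← List.length_attach (l := points)]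
  refine List.length_filter_lt_length_iff_exists.2
    ⟨⟨points.head h, List.head_mem h⟩, List.mem_attach _ _, ?_⟩
  simp

def planar_support_alt (homology : List (List Int × Int)) : Int :=
  pvALoop (PySem.Dict.keys (PySem.Dict.ofList homology))

-- ===== PORT B =====
def planar_support_alt_alt (homology : List (List Int × Int)) : Int :=
  ((PySem.Set.ofList ((PySem.Dict.keys (PySem.Dict.ofList homology)).map List.sum)).length : Int)

-- ===== PRECONDITION & SPEC =====
def Spec_planar_support_alt (homology : List (List Int × Int)) (out : Int) : Prop := out = planar_support_alt_alt homology
instance (homology : List (List Int × Int)) (out : Int) : Decidable (Spec_planar_support_alt homology out) := by unfold Spec_planar_support_alt; infer_instance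

-- ===== CLAIM (what is proved, stated in full; the proofs are below) =====
def Claim_equal_planar_support_alt : Prop := ∀ (homology : List (List Int × Int)), Dom_planar_support_alt homology → Spec_planar_support_alt homology (planar_support_alt homology)

-- ===== LEMMAS AND PROOFS =====

lemma pvSet_length_eq_card (l : List Int) :
    (PySem.Set.ofList l).length = l.toFinset.card := by
  have hnd : (PySem.Set.ofList l).Nodup := PySem.Set.nodup_ofList l
  have : (PySem.Set.ofList l).toFinset = l.toFinset := by
    ext x; simp [PySem.Set.mem_ofList]
  rw [← this, List.toFinset_card_of_nodup hnd]

lemma pvMapFilterSum (l : List (List Int)) (delta : Int) :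
    (l.filter (fun point => point.sum ≠ delta)).map List.sum
      = (l.map List.sum).filter (fun x => x ≠ delta) := by
  induction l with
  | nil => rfl
  | cons b r ihr =>
    simp only [List.map_cons, List.filter_cons]
    cases decide (b.sum ≠ delta)
    · simpa using ihr
    · simpa using ihr

lemma pvALoop_eq_card_aux : ∀ (n : Nat) (points : List (List Int)), points.length ≤ n →
    pvALoop points = ((points.map List.sum).toFinset.card : Int) := by
  intro n
  induction n with
  | zero =>
    intro points hp
    have h0 : points = [] := by cases points <;> simp_all
    subst h0; simp [pvALoop]
  | succ n ih =>
    intro points hp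
    by_cases h : points = []
    · subst h; simp [pvALoop]
    · rw [pvALoop]
      simp only [dif_neg h]
      have hlt : (points.filter (fun point => point.sum ≠ (points.head h).sum)).length
          < points.length := by
        refine List.length_filter_lt_length_iff_exists.2
          ⟨points.head h, List.head_mem h, ?_⟩
        simp
      rw [ih _ (by omega), pvMapFilterSum]
      have hfin : ((points.map List.sum).filter (fun x => x ≠ (points.head h).sum)).toFinset
          = (points.map List.sum).toFinset.erase (points.head h).sum := by
        ext x; simp; tauto
      rw [hfin]
      have hmem : (points.head h).sum ∈ (points.map List.sum).toFinset := by
        simp only [List.mem_toFinset, List.mem_map]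
        exact ⟨points.head h, List.head_mem h, rfl⟩
      have := Finset.card_erase_add_one hmem
      omega

lemma pvALoop_eq_card (points : List (List Int)) :
    pvALoop points = ((points.map List.sum).toFinset.card : Int) :=
  pvALoop_eq_card_aux points.length points le_rfl

-- ===== VERDICT (by name: the statement is the Claim_ definition above) =====
theorem planar_support_alt_spec : Claim_equal_planar_support_alt := by
  intro homology _
  unfold Spec_planar_support_alt planar_support_alt planar_support_alt_alt
  rw [pvALoop_eq_card, pvSet_length_eq_card]
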